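-- pv_equiv track=rewrite | github.com/Piseratopo/-n-t-p-V-t-L- | utils/util_latex_general.py | parse_expression_with_parentheses
-- ===== SOURCE A (Python) =====
-- def add_token(token_list, current_pos, current_token):
--     if current_token:
--         token_list.append((current_pos, current_token))
--         current_token = ""
--     return current_token
--
-- def parse_expression_with_parentheses(expression):
--     def is_in_component(ch):
--         return ch.isalnum() or ch in "()"
--
--     tokens = []
--     current_token = ""
--     current_pos = 0
--     current_is_in_component = False
--     for ch in expression:
--         if ch == " ":
--             if current_token:
--                 current_token = add_token(tokens, current_pos, current_token)
--                 current_pos += 1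
--             continue
--         if is_in_component(ch) != current_is_in_component:
--             if current_token:
--                 current_token = add_token(tokens, current_pos, current_token)
--                 current_pos += 1
--             current_is_in_component = is_in_component(ch)
--         current_token += ch
--     add_token(tokens, current_pos, current_token)
--     return tokens
-- ===== SOURCE B (Python) =====
-- def parse_expression_with_parentheses(expression):
--     def classify(ch):
--         if ch == " ":
--             return 0
--         return 1 if ch.isalnum() or ch in "()" else 2
--     n = len(expression)
--     runs = []
--     i = 0
--     while i < n:
--         k = classify(expression[i])
--         if k == 0:
--             i += 1
--             continue
--         j = i + 1
--         while j < n and classify(expression[j]) == k: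
--             j += 1
--         runs.append(expression[i:j])
--         i = j
--     return list(enumerate(runs))
-- ===== Notes on version B (the rewrite author's own statement) =====
-- stated objective: alternative
-- what changed: Replaces A's character-by-character flush/state machine (current_token, current_pos, current_is_in_component) with run-grouping: an outer loop that skips spaces and consumes one whole same-class run per iteration (inner scan + slice), then numbers the collected runs with a single enumerate.
import Mathlib
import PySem

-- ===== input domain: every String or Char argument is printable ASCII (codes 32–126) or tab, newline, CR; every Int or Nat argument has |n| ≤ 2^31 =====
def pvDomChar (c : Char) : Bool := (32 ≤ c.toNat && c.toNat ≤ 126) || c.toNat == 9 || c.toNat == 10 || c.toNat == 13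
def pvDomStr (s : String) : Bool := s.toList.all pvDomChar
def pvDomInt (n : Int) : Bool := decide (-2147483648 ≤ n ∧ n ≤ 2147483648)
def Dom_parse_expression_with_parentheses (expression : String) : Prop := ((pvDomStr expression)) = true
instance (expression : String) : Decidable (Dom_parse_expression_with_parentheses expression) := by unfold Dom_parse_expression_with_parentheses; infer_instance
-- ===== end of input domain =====

-- B replaces A's flush/state-machine with per-run scanning (outer loop per token, inner
-- scan per run) followed by a single enumerate; same values, different decomposition.

-- ===== PORT A =====
-- ch.isalnum() or ch in "()"
def pvIsInComp (c : Char) : Bool := PySem.Chars.isalnum c || c == '(' || c == ')'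

-- A's for-loop; current_token is carried as List Char (PySem string convention)
def pvALoop : List Char → List (Int × String) → List Char → Int → Bool → List (Int × String)
  | [], toks, cur, pos, _ =>
      if cur ≠ [] then toks ++ [(pos, String.ofList cur)] else toks
  | ch :: rest, toks, cur, pos, inC =>
      if ch = ' ' then
        if cur ≠ [] then pvALoop rest (toks ++ [(pos, String.ofList cur)]) [] (pos + 1) inC
        else pvALoop rest toks cur pos inC
      else if pvIsInComp ch ≠ inC then
        if cur ≠ [] then
          pvALoop rest (toks ++ [(pos, String.ofList cur)]) [ch] (pos + 1) (pvIsInComp ch)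
        else pvALoop rest toks (cur ++ [ch]) pos (pvIsInComp ch)
      else pvALoop rest toks (cur ++ [ch]) pos inC

def parse_expression_with_parentheses (expression : String) : List (Int × String) :=
  pvALoop expression.toList [] [] 0 false

-- ===== PORT B =====
def pvClassify (c : Char) : Nat :=
  if c = ' ' then 0 else if pvIsInComp c then 1 else 2

-- B's outer while loop: skip spaces, otherwise take the whole same-class run at once
def pvBRuns : List Char → List String
  | [] => []
  | c :: cs =>
      if pvClassify c = 0 then pvBRuns cs
      else String.ofList (c :: cs.takeWhile (fun d => pvClassify d = pvClassify c))
             :: pvBRuns (cs.dropWhile (fun d => pvClassify d = pvClassify c))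
  termination_by l => l.length
  decreasing_by
    · simp
    · exact Nat.lt_succ_of_le (List.length_dropWhile_le _ _)

def parse_expression_with_parentheses_alt (expression : String) : List (Int × String) :=
  PySem.List.enumerate (pvBRuns expression.toList) 0

-- ===== PRECONDITION & SPEC =====
def Spec_parse_expression_with_parentheses (expression : String) (out : List (Int × String)) : Prop := out = parse_expression_with_parentheses_alt expression
instance (expression : String) (out : List (Int × String)) : Decidable (Spec_parse_expression_with_parentheses expression out) := by unfold Spec_parse_expression_with_parentheses; infer_instance

-- ===== CLAIM (what is proved, stated in full; the proofs are below) =====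
def Claim_equal_parse_expression_with_parentheses : Prop := ∀ (expression : String), Dom_parse_expression_with_parentheses expression → Spec_parse_expression_with_parentheses expression (parse_expression_with_parentheses expression)

-- ===== LEMMAS AND PROOFS =====

-- the two loop invariants at once: between tokens (cur = []) and mid-run (cur all of class k)
lemma pvMain (cs : List Char) :
    (∀ toks pos inC, pvALoop cs toks [] pos inC =
        toks ++ PySem.List.enumerate (pvBRuns cs) pos)
    ∧ (∀ toks pos cur k, (k = 1 ∨ k = 2) → cur ≠ [] → (∀ c ∈ cur, pvClassify c = k) →
        pvALoop cs toks cur pos (k == 1) =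
          toks ++ PySem.List.enumerate
            (String.ofList (cur ++ cs.takeWhile (fun d => pvClassify d = k))
              :: pvBRuns (cs.dropWhile (fun d => pvClassify d = k))) pos) := by
  induction cs with
  | nil =>
    refine ⟨fun toks pos inC => by simp [pvALoop, pvBRuns, PySem.List.enumerate_nil],
            fun toks pos cur k hk hne hall => by
              simp [pvALoop, pvBRuns, hne, PySem.List.enumerate_cons,
                    PySem.List.enumerate_nil]⟩
  | cons c cs ih =>
    obtain ⟨ih1, ih2⟩ := ih
    constructor
    · intro toks pos inC
      by_cases hsp : c = ' '
      · subst hsp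
        have hL : pvALoop (' ' :: cs) toks [] pos inC = pvALoop cs toks [] pos inC := by
          simp [pvALoop]
        rw [hL, ih1]
        simp [pvBRuns, pvClassify]
      · have hstep : pvALoop (c :: cs) toks [] pos inC
            = pvALoop cs toks [c] pos (pvIsInComp c) := by
          by_cases h : pvIsInComp c = inC
          · simp [pvALoop, hsp, h]
          · simp [pvALoop, hsp, h]
        rw [hstep]
        cases hb : pvIsInComp c with
        | true =>
          have h1 : pvClassify c = 1 := by simp [pvClassify, hsp, hb]
          have := ih2 toks pos [c] 1 (Or.inl rfl) (by simp) (by simp [h1])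
          simp only [Nat.reduceBEq] at this
          rw [this]
          simp [pvBRuns, h1]
        | false =>
          have h2 : pvClassify c = 2 := by simp [pvClassify, hsp, hb]
          have := ih2 toks pos [c] 2 (Or.inr rfl) (by simp) (by simp [h2])
          simp only [Nat.reduceBEq] at this
          rw [this]
          simp [pvBRuns, h2]
    · intro toks pos cur k hk hne hall
      by_cases hsp : c = ' '
      · subst hsp
        have hk0 : ¬ ((0:Nat) = k) := by
          rcases hk with rfl | rfl <;> simp
        have hL : pvALoop (' ' :: cs) toks cur pos (k == 1)
            = pvALoop cs (toks ++ [(pos, String.ofList cur)]) [] (pos + 1) (k == 1) := by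
          simp [pvALoop, hne]
        rw [hL, ih1]
        simp [pvBRuns, pvClassify, hk0, PySem.List.enumerate_cons]
      · cases hb : pvIsInComp c with
        | true =>
          have h1 : pvClassify c = 1 := by simp [pvClassify, hsp, hb]
          rcases hk with rfl | rfl
          · -- same class: extend the run
            have hL : pvALoop (c :: cs) toks cur pos ((1 : Nat) == 1)
                = pvALoop cs toks (cur ++ [c]) pos ((1 : Nat) == 1) := by
              simp [pvALoop, hsp, hb]
            rw [hL, ih2 toks pos (cur ++ [c]) 1 (Or.inl rfl) (by simp)
                  (by intro x hx; rcases List.mem_append.1 hx with h | h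
                      · exact hall x h
                      · simp at h; subst h; exact h1)]
            simp [h1]
          · -- class change 2 → 1: flush, start new run
            have hL : pvALoop (c :: cs) toks cur pos ((2 : Nat) == 1)
                = pvALoop cs (toks ++ [(pos, String.ofList cur)]) [c] (pos + 1) (pvIsInComp c) := by
              simp [pvALoop, hsp, hb, hne]
            have := ih2 (toks ++ [(pos, String.ofList cur)]) (pos + 1) [c] 1
                      (Or.inl rfl) (by simp) (by simp [h1])
            simp only [Nat.reduceBEq] at this
            rw [hL, hb, this]
            simp [pvBRuns, h1, PySem.List.enumerate_cons]
        | false =>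
          have h2 : pvClassify c = 2 := by simp [pvClassify, hsp, hb]
          rcases hk with rfl | rfl
          · -- class change 1 → 2: flush, start new run
            have hL : pvALoop (c :: cs) toks cur pos ((1 : Nat) == 1)
                = pvALoop cs (toks ++ [(pos, String.ofList cur)]) [c] (pos + 1) (pvIsInComp c) := by
              simp [pvALoop, hsp, hb, hne]
            have := ih2 (toks ++ [(pos, String.ofList cur)]) (pos + 1) [c] 2
                      (Or.inr rfl) (by simp) (by simp [h2])
            simp only [Nat.reduceBEq] at this
            rw [hL, hb, this]
            simp [pvBRuns, h2, PySem.List.enumerate_cons]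
          · -- same class: extend the run
            have hL : pvALoop (c :: cs) toks cur pos ((2 : Nat) == 1)
                = pvALoop cs toks (cur ++ [c]) pos ((2 : Nat) == 1) := by
              simp [pvALoop, hsp, hb]
            rw [hL, ih2 toks pos (cur ++ [c]) 2 (Or.inr rfl) (by simp)
                  (by intro x hx; rcases List.mem_append.1 hx with h | h
                      · exact hall x h
                      · simp at h; subst h; exact h2)]
            simp [h2]

-- ===== VERDICT (by name: the statement is the Claim_ definition above) =====
theorem parse_expression_with_parentheses_spec : Claim_equal_parse_expression_with_parentheses := by
  intro e _
  unfold Spec_parse_expression_with_parentheses parse_expression_with_parentheses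
    parse_expression_with_parentheses_alt
  simpa using (pvMain e.toList).1 [] 0 false
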